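-- pv_equiv track=rewrite | github.com/EricDing618/Equation | base.py | sm_parenthesis
-- ===== SOURCE A (Python) =====
-- def sm_parenthesis(e:str):
--     c1=e.split('(')
--     c2:list=[]
--     for i in range(len(c1)):
--         c3=c1[i].split(")")
--         for j in range(len(c3)):
--             c2.append(c3[j])
--     return c2
-- ===== SOURCE B (Python) =====
-- def sm_parenthesis(e: str):
--     c2 = []
--     buf = ''
--     for ch in e:
--         if ch == '(' or ch == ')':
--             c2.append(buf)
--             buf = ''
--         else:
--             buf += ch
--     c2.append(buf)
--     return c2
-- ===== Notes on version B (the rewrite author's own statement) =====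
-- stated objective: simpler
-- what changed: Replaced the split-then-nested-index-loops flattening with a single linear character scan that flushes a buffer at each parenthesis.
import Mathlib
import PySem

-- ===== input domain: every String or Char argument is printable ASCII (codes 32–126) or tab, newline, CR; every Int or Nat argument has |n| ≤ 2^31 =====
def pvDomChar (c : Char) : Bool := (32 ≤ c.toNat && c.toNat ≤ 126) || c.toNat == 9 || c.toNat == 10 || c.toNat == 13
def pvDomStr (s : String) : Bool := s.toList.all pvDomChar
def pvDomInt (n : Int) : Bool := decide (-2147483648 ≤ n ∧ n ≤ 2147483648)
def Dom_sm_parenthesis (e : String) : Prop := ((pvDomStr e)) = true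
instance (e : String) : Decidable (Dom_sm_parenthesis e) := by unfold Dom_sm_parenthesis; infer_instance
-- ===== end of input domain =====

-- B replaces A's split('(') + nested index loops by one linear character scan with a buffer; objective: simpler.

-- ===== PORT A =====
def sm_parenthesis (e : String) : List String :=
  let c1 := PySem.Chars.splitOn e.toList ['(']
  let c2 := (PySem.List.pyRange 0 (PySem.List.len c1) 1).foldl (fun c2 i =>
    let c3 := PySem.Chars.splitOn (PySem.List.pyGetD c1 i []) [')']
    (PySem.List.pyRange 0 (PySem.List.len c3) 1).foldl (fun c2 j =>
      c2 ++ [String.mk (PySem.List.pyGetD c3 j [])]) c2) ([] : List String)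
  c2

-- ===== PORT B =====
def sm_parenthesis_alt (e : String) : List String :=
  let st := e.toList.foldl (fun (st : List String × List Char) ch =>
    if ch = '(' ∨ ch = ')' then (st.1 ++ [String.mk st.2], [])
    else (st.1, st.2 ++ [ch])) (([], []) : List String × List Char)
  st.1 ++ [String.mk st.2]

-- ===== PRECONDITION & SPEC =====
def Spec_sm_parenthesis (e : String) (out : List String) : Prop := out = sm_parenthesis_alt e
instance (e : String) (out : List String) : Decidable (Spec_sm_parenthesis e out) := by unfold Spec_sm_parenthesis; infer_instance

-- ===== CLAIM (what is proved, stated in full; the proofs are below) =====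
def Claim_equal_sm_parenthesis : Prop := ∀ (e : String), Dom_sm_parenthesis e → Spec_sm_parenthesis e (sm_parenthesis e)

-- ===== LEMMAS AND PROOFS =====

/-- Clean recursion for splitting a char list on one character `c` (buffer `buf` in order). -/
def fsp (c : Char) : List Char → List Char → List (List Char)
  | [], buf => [buf]
  | d :: r, buf => if d = c then buf :: fsp c r [] else fsp c r (buf ++ [d])

/-- Clean recursion for B's scan: split on both parentheses. -/
def sp : List Char → List Char → List (List Char)
  | [], buf => [buf]
  | d :: r, buf => if d = '(' ∨ d = ')' then buf :: sp r [] else sp r (buf ++ [d])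

theorem foldl_congr' {α β : Type} {f g : β → α → β} {l : List α} {init : β}
    (h : ∀ (b : β) (a : α), f b a = g b a) : l.foldl f init = l.foldl g init := by
  induction l generalizing init with
  | nil => rfl
  | cons x xs ih => simp only [List.foldl_cons, h]; exact ih

theorem go_spec (c : Char) : ∀ (fuel : Nat) (l cur : List Char) (acc : List (List Char)),
    l.length < fuel →
    PySem.Chars.splitOn.go [c] fuel l cur acc = acc.reverse ++ fsp c l cur.reverse := by
  intro fuel
  induction fuel with
  | zero => intro l cur acc h; omega
  | succ n ih =>
    intro l cur acc h
    match l with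
    | [] => simp [PySem.Chars.splitOn.go, fsp]
    | d :: r =>
      simp only [PySem.Chars.splitOn.go]
      by_cases hd : d = c
      · subst hd
        have hpre : List.isPrefixOf [d] (d :: r) = true := by
          simp [List.isPrefixOf]
        simp only [hpre, if_true]
        rw [show List.drop [d].length (d :: r) = r by simp]
        rw [ih r [] (cur.reverse :: acc) (by simp at h ⊢; omega)]
        simp [fsp]
      · have hpre : List.isPrefixOf [c] (d :: r) = false := by
          simp [List.isPrefixOf]; exact fun hc => absurd hc.symm hd
        simp only [hpre, Bool.false_eq_true, if_false]
        rw [ih r (d :: cur) acc (by simp at h ⊢; omega)]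
        simp [fsp, hd]

theorem splitOn_eq_fsp (c : Char) (l : List Char) :
    PySem.Chars.splitOn l [c] = fsp c l [] := by
  have := go_spec c (l.length + 1) l [] [] (by omega)
  simpa [PySem.Chars.splitOn] using this

theorem fsp_buf (c : Char) : ∀ (l buf : List Char),
    fsp c l buf = (buf ++ (fsp c l []).headI) :: (fsp c l []).tail := by
  intro l
  induction l with
  | nil => intro buf; simp [fsp]
  | cons d r ih =>
    intro buf
    by_cases hd : d = c
    · simp [fsp, hd]
    · simp only [fsp, if_neg hd]
      simp only [List.nil_append]
      rw [ih (buf ++ [d]), ih [d]]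
      simp

theorem sp_buf : ∀ (l buf : List Char),
    sp l buf = (buf ++ (sp l []).headI) :: (sp l []).tail := by
  intro l
  induction l with
  | nil => intro buf; simp [sp]
  | cons d r ih =>
    intro buf
    by_cases hd : d = '(' ∨ d = ')'
    · simp [sp, hd]
    · simp only [sp, if_neg hd]
      simp only [List.nil_append]
      rw [ih (buf ++ [d]), ih [d]]
      simp

theorem key0 : ∀ (l : List Char),
    (fsp '(' l []).flatMap (fun p => fsp ')' p []) = sp l [] := by
  intro l
  induction l with
  | nil => simp [fsp, sp]
  | cons d r ih =>
    have hsplit : (fsp '(' r []).headI :: (fsp '(' r []).tail = fsp '(' r [] := by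
      cases hfr : fsp '(' r [] with
      | nil => exfalso; rw [fsp_buf '(' r []] at hfr; simp at hfr
      | cons a t => simp
    by_cases h1 : d = '('
    · simp [fsp, sp, h1, ih]
    · by_cases h2 : d = ')'
      · subst h2
        simp only [fsp, if_neg h1, sp, or_true, if_true, List.nil_append]
        rw [fsp_buf '(' r [')']]
        simp only [List.flatMap_cons, List.singleton_append]
        rw [show fsp ')' (')' :: (fsp '(' r []).headI) [] = [] :: fsp ')' (fsp '(' r []).headI [] by
          simp [fsp]]
        rw [show ([] :: fsp ')' (fsp '(' r []).headI []) ++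
              (fsp '(' r []).tail.flatMap (fun p => fsp ')' p [])
            = [] :: ((fsp '(' r []).headI :: (fsp '(' r []).tail).flatMap (fun p => fsp ')' p []) by
          simp]
        rw [hsplit, ih]
      · simp only [fsp, if_neg h1, sp,
          if_neg (by tauto : ¬ (d = '(' ∨ d = ')')), List.nil_append]
        rw [fsp_buf '(' r [d], sp_buf r [d]]
        simp only [List.flatMap_cons, List.singleton_append]
        rw [show fsp ')' (d :: (fsp '(' r []).headI) [] = fsp ')' (fsp '(' r []).headI ([] ++ [d]) by
          simp [fsp, h2]]
        simp only [List.nil_append]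
        rw [fsp_buf ')' (fsp '(' r []).headI [d]]
        have hih : fsp ')' (fsp '(' r []).headI [] ++
            (fsp '(' r []).tail.flatMap (fun p => fsp ')' p []) = sp r [] := by
          rw [show fsp ')' (fsp '(' r []).headI [] ++
                (fsp '(' r []).tail.flatMap (fun p => fsp ')' p [])
              = ((fsp '(' r []).headI :: (fsp '(' r []).tail).flatMap (fun p => fsp ')' p []) by
            simp]
          rw [hsplit, ih]
        have hne : fsp ')' (fsp '(' r []).headI []
            = (fsp ')' (fsp '(' r []).headI []).headI :: (fsp ')' (fsp '(' r []).headI []).tail := by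
          rw [fsp_buf ')' (fsp '(' r []).headI []]; simp
        have hh : (sp r []).headI = (fsp ')' (fsp '(' r []).headI []).headI := by
          rw [← hih, hne]; simp
        have ht : (sp r []).tail = (fsp ')' (fsp '(' r []).headI []).tail ++
            (fsp '(' r []).tail.flatMap (fun p => fsp ')' p []) := by
          rw [← hih, hne]; simp
        simp [hh, ht]

theorem B_foldl : ∀ (l : List Char) (acc : List String) (buf : List Char),
    (l.foldl (fun (st : List String × List Char) ch =>
      if ch = '(' ∨ ch = ')' then (st.1 ++ [String.mk st.2], [])
      else (st.1, st.2 ++ [ch])) (acc, buf)).1 ++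
      [String.mk (l.foldl (fun (st : List String × List Char) ch =>
        if ch = '(' ∨ ch = ')' then (st.1 ++ [String.mk st.2], [])
        else (st.1, st.2 ++ [ch])) (acc, buf)).2]
    = acc ++ (sp l buf).map String.mk := by
  intro l
  induction l with
  | nil => intro acc buf; simp [sp]
  | cons d r ih =>
    intro acc buf
    by_cases hd : d = '(' ∨ d = ')'
    · simp only [List.foldl_cons, if_pos hd, sp]
      rw [ih]; simp
    · simp only [List.foldl_cons, if_neg hd, sp]
      rw [ih]

-- ===== VERDICT (by name: the statement is the Claim_ definition above) =====
theorem sm_parenthesis_spec : Claim_equal_sm_parenthesis := by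
  intro e _
  unfold Spec_sm_parenthesis sm_parenthesis sm_parenthesis_alt
  simp only []
  rw [PySem.List.foldl_pyRange_pyGetD (PySem.Chars.splitOn e.toList ['('])
        ([] : List Char)
        (fun c2 p => List.foldl
          (fun c2 j => c2 ++ [String.mk (PySem.List.pyGetD (PySem.Chars.splitOn p [')']) j [])])
          c2 (PySem.List.pyRange 0 (PySem.List.len (PySem.Chars.splitOn p [')']))))
        ([] : List String) (le_refl 0)]
  simp only [Int.toNat_zero, List.drop_zero]
  have inner : ∀ (c2 : List String) (p : List Char),
      List.foldl (fun c2 j => c2 ++ [String.mk (PySem.List.pyGetD (PySem.Chars.splitOn p [')']) j [])])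
        c2 (PySem.List.pyRange 0 (PySem.List.len (PySem.Chars.splitOn p [')'])))
      = c2 ++ (PySem.Chars.splitOn p [')']).map String.mk := by
    intro c2 p
    rw [PySem.List.foldl_pyRange_pyGetD (PySem.Chars.splitOn p [')']) ([] : List Char)
          (fun c2 x => c2 ++ [String.mk x]) c2 (le_refl 0)]
    simp only [Int.toNat_zero, List.drop_zero]
    rw [PySem.List.foldl_append_singleton_eq_map]
  rw [foldl_congr' inner]
  rw [PySem.List.foldl_append_eq_flatMap]
  rw [B_foldl e.toList [] []]
  simp only [List.nil_append]
  rw [← key0]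
  simp only [splitOn_eq_fsp, List.map_flatMap]
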